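-- pv_equiv track=rewrite | github.com/kompl/github-tests-analyzer | lib/analyze.py | _has_flaky_behavior
-- ===== SOURCE A (Python) =====
-- from typing import Dict, Set, List, Optional, Tuple, Any
--
-- def _has_flaky_behavior(states: List[bool]) -> bool:
--     """Проверяет, есть ли у теста нестабильное поведение (чередование падений и успехов)."""
--     if len(states) < 2:
--         return False
--
--     # Считаем количество переходов между состояниями
--     transitions = 0
--     for i in range(1, len(states)):
--         if states[i] != states[i - 1]:
--             transitions += 1
--
--     # Если больше одного перехода, считаем тест нестабильным
--     return transitions > 2
-- ===== SOURCE B (Python) =====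
-- def _has_flaky_behavior(states):
--     """Pack the boolean history into a bitmask; the set bits of n ^ (n >> 1),
--     restricted to the len-1 adjacent-pair positions, are exactly the state
--     transitions; the test is flaky iff more than 2 such bits are set."""
--     n = 0
--     for s in states:
--         n = (n << 1) | s
--     pairs = (n ^ (n >> 1)) & ((1 << max(len(states) - 1, 0)) - 1)
--     return pairs.bit_count() > 2
-- ===== Notes on version B (the rewrite author's own statement) =====
-- stated objective: alternative
-- what changed: B packs the boolean history into an integer bitmask and decides flakiness by popcount of (n ^ (n >> 1)) masked to the adjacent-pair bit positions, instead of A's guarded index loop counting adjacent transitions.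
import Mathlib
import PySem

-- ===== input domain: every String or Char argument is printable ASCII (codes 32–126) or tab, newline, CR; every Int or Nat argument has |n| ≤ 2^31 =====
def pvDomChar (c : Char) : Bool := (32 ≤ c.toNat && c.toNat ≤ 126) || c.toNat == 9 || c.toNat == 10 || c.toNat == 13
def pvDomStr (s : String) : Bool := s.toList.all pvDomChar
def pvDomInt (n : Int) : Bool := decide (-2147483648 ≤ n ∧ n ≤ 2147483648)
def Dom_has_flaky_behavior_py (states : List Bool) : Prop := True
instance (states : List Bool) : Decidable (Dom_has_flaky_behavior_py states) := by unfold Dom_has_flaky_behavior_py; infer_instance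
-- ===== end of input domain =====

-- B packs the history into an integer bitmask and counts the set bits of n xor (n >> 1)
-- (masked to the adjacent-pair positions) instead of A's index loop; objective: alternative.

-- ===== PORT A =====
def has_flaky_behavior_py (states : List Bool) : Bool :=
  if states.length < 2 then false
  else
    let transitions : Int :=
      (PySem.List.pyRange 1 (states.length : Int) 1).foldl
        (fun t i =>
          if PySem.List.pyGetD states i false ≠ PySem.List.pyGetD states (i - 1) false
          then t + 1 else t) 0
    decide (transitions > 2)

-- ===== PORT B =====
-- exact port of int.bit_count (number of 1 bits of a nonnegative int)
def pvBitCount (n : Nat) : Nat :=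
  if n = 0 then 0 else n % 2 + pvBitCount (n / 2)
decreasing_by exact Nat.div_lt_self (Nat.pos_of_ne_zero (by assumption)) (by omega)

def has_flaky_behavior_py_alt (states : List Bool) : Bool :=
  let n : Nat := states.foldl (fun n s => (n <<< 1) ||| (if s then 1 else 0)) 0
  let pairs : Nat := (n ^^^ (n >>> 1)) &&& ((1 <<< (max (states.length - 1) 0)) - 1)
  decide (pvBitCount pairs > 2)

-- ===== PRECONDITION & SPEC =====
def Spec_has_flaky_behavior_py (states : List Bool) (out : Bool) : Prop := out = has_flaky_behavior_py_alt states
instance (states : List Bool) (out : Bool) : Decidable (Spec_has_flaky_behavior_py states out) := by unfold Spec_has_flaky_behavior_py; infer_instance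

-- ===== CLAIM (what is proved, stated in full; the proofs are below) =====
def Claim_equal_has_flaky_behavior_py : Prop := ∀ (states : List Bool), Dom_has_flaky_behavior_py states → Spec_has_flaky_behavior_py states (has_flaky_behavior_py states)

-- ===== LEMMAS AND PROOFS =====

-- number of adjacent transitions after a leading state a
def transF (a : Bool) : List Bool → Nat
  | [] => 0
  | b :: t => (if b ≠ a then 1 else 0) + transF b t

theorem transF_snoc (t : List Bool) : ∀ (a b : Bool),
    transF a (t ++ [b]) = transF a t + (if some b ≠ (a :: t).getLast? then 1 else 0) := by
  induction t with
  | nil => intro a b; by_cases h : b = a <;> simp [transF, h]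
  | cons c t ih =>
    intro a b
    simp only [List.cons_append, transF, ih c b]
    have : (a :: c :: t).getLast? = (c :: t).getLast? := by
      simp [List.getLast?_cons_cons]
    rw [this]; omega

-- A's loop computes transF of head/tail
theorem acount (xs : List Bool) :
    (PySem.List.pyRange 1 (xs.length : Int) 1).foldl
        (fun t i =>
          if PySem.List.pyGetD xs i false ≠ PySem.List.pyGetD xs (i - 1) false
          then t + 1 else t) (0 : Int)
      = (if h : xs = [] then 0 else (transF (xs.head h) xs.tail : Int)) := by
  induction xs using List.reverseRecOn with
  | nil => simp [PySem.List.pyRange_one_eq_nil]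
  | append_singleton xs b ih =>
    rcases eq_or_ne xs [] with rfl | hxs
    · simp [PySem.List.pyRange_one_eq_nil, transF]
    · have hlen : 1 ≤ xs.length := by
        cases xs with | nil => exact absurd rfl hxs | cons _ _ => simp
      have hsplit : PySem.List.pyRange 1 ((xs ++ [b]).length : Int) 1
          = PySem.List.pyRange 1 (xs.length : Int) 1 ++ [(xs.length : Int)] := by
        have hl : ((xs ++ [b]).length : Int) = (xs.length : Int) + 1 := by
          simp
        rw [hl, PySem.List.pyRange_one_succ_right (by exact_mod_cast hlen)]
      rw [hsplit, List.foldl_append]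
      have hcongr : (PySem.List.pyRange 1 (xs.length : Int) 1).foldl
            (fun t i =>
              if PySem.List.pyGetD (xs ++ [b]) i false ≠ PySem.List.pyGetD (xs ++ [b]) (i - 1) false
              then t + 1 else t) (0 : Int)
          = (PySem.List.pyRange 1 (xs.length : Int) 1).foldl
            (fun t i =>
              if PySem.List.pyGetD xs i false ≠ PySem.List.pyGetD xs (i - 1) false
              then t + 1 else t) (0 : Int) := by
        apply PySem.List.foldl_congr_mem
        intro acc i hi
        rw [PySem.List.mem_pyRange_one] at hi
        have h1 : PySem.List.pyGetD (xs ++ [b]) i false = PySem.List.pyGetD xs i false := by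
          rw [PySem.List.pyGetD_eq_getElem _ _ (by omega) (by simp; omega),
              PySem.List.pyGetD_eq_getElem _ _ (by omega) (by exact_mod_cast hi.2)]
          exact List.getElem_append_left (by omega)
        have h2 : PySem.List.pyGetD (xs ++ [b]) (i - 1) false = PySem.List.pyGetD xs (i - 1) false := by
          rw [PySem.List.pyGetD_eq_getElem _ _ (by omega) (by simp; omega),
              PySem.List.pyGetD_eq_getElem _ _ (by omega) (by omega)]
          exact List.getElem_append_left (by omega)
        rw [h1, h2]
      rw [hcongr, ih]
      rw [dif_neg hxs, dif_neg (by simp)]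
      have hb1 : PySem.List.pyGetD (xs ++ [b]) ((xs.length : Int)) false = b := by
        rw [PySem.List.pyGetD_eq_getElem _ _ (by omega) (by simp)]
        simp
      have hb2 : PySem.List.pyGetD (xs ++ [b]) ((xs.length : Int) - 1) false = xs.getLast hxs := by
        rw [PySem.List.pyGetD_eq_getElem _ _ (by omega) (by simp)]
        have hlt : ((xs.length : Int) - 1).toNat < xs.length := by omega
        rw [List.getElem_append_left hlt]
        have ht : ((xs.length : Int) - 1).toNat = xs.length - 1 := by omega
        simp [ht, List.getLast_eq_getElem]
      simp only [List.foldl_cons, List.foldl_nil]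
      rw [hb1, hb2]
      have hhead : (xs ++ [b]).head (by simp) = xs.head hxs := by
        cases xs with | nil => exact absurd rfl hxs | cons _ _ => simp
      have htail : (xs ++ [b]).tail = xs.tail ++ [b] := by
        cases xs with | nil => exact absurd rfl hxs | cons _ _ => simp
      rw [hhead, htail, transF_snoc]
      have hlast : (xs.head hxs :: xs.tail).getLast? = some (xs.getLast hxs) := by
        have hcl : xs.head hxs :: xs.tail = xs := by
          cases xs with | nil => exact absurd rfl hxs | cons _ _ => rfl
        rw [hcl]; exact List.getLast?_eq_some_getLast hxs
      rw [hlast]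
      by_cases hbe : b = xs.getLast hxs <;> simp [hbe]

-- ---- bit arithmetic helpers for B ----

theorem or_step (a : Nat) (t : Bool) : (2*a) ||| t.toNat = 2*a + t.toNat := by
  have h1 : 2*a = Nat.bit false a := by simp [Nat.bit_val]
  have h2 : t.toNat = Nat.bit t 0 := by simp [Nat.bit_val]
  rw [h1, h2, Nat.lor_bit]
  simp [Nat.bit_val]

theorem xor_step (a b : Nat) (t u : Bool) :
    (2*a + t.toNat) ^^^ (2*b + u.toNat) = 2*(a ^^^ b) + ((t != u)).toNat := by
  rw [← Nat.bit_val, ← Nat.bit_val, Nat.xor_bit, Nat.bit_val]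

theorem pvBitCount_zero : pvBitCount 0 = 0 := by unfold pvBitCount; simp

theorem pvBitCount_step (m : Nat) (s : Nat) (hs : s ≤ 1) :
    pvBitCount (2*m + s) = pvBitCount m + s := by
  rcases Nat.eq_zero_or_pos (2*m + s) with h | h
  · have hm : m = 0 := by omega
    have hs0 : s = 0 := by omega
    simp [hm, hs0, pvBitCount_zero]
  · rw [pvBitCount]
    rw [if_neg (by omega)]
    have h2 : (2*m + s) % 2 = s := by omega
    have h3 : (2*m + s) / 2 = m := by omega
    rw [h2, h3]; omega

theorem mod_double (m s K : Nat) (hs : s ≤ 1) (hK : 0 < K) :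
    (2*m + s) % (2*K) = 2*(m % K) + s := by
  have := Nat.div_add_mod m K
  have hr : m % K < K := Nat.mod_lt _ hK
  have hmul : (m / K) * (2*K) = 2*(K*(m / K)) := by ring
  calc (2*m + s) % (2*K) = ((m / K) * (2*K) + (2*(m % K) + s)) % (2*K) := by
        congr 1; omega
    _ = (2*(m % K) + s) % (2*K) := by rw [Nat.add_comm, Nat.add_mul_mod_self_right]
    _ = 2*(m % K) + s := Nat.mod_eq_of_lt (by omega)

-- the arithmetic encoding of the packing loop
def encA (xs : List Bool) : Nat := xs.foldl (fun n s => 2*n + (if s then 1 else 0)) 0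

theorem enc_eq (xs : List Bool) :
    xs.foldl (fun n s => (n <<< 1) ||| (if s then 1 else 0)) 0 = encA xs := by
  unfold encA
  have hf : (fun (n : Nat) (s : Bool) => (n <<< 1) ||| (if s then 1 else 0))
      = (fun (n : Nat) (s : Bool) => 2*n + (if s then 1 else 0)) := by
    funext n s
    have h1 : n <<< 1 = 2*n := by simp [Nat.shiftLeft_eq]; ring
    have h2 : (if s then (1:Nat) else 0) = s.toNat := by cases s <;> simp
    rw [h1, h2, or_step]
  rw [hf]

theorem encA_snoc (xs : List Bool) (b : Bool) :
    encA (xs ++ [b]) = 2 * encA xs + b.toNat := by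
  unfold encA
  rw [List.foldl_append]
  simp only [List.foldl_cons, List.foldl_nil]
  cases b <;> simp

-- key invariant: parity = last element, masked-xor bit count = transition count
theorem key (xs : List Bool) (hxs : xs ≠ []) :
    encA xs % 2 = (xs.getLast hxs).toNat ∧
    pvBitCount ((encA xs ^^^ encA xs / 2) % 2 ^ (xs.length - 1))
      = transF (xs.head hxs) xs.tail := by
  induction xs using List.reverseRecOn with
  | nil => exact absurd rfl hxs
  | append_singleton xs b ih =>
    rcases eq_or_ne xs [] with rfl | hne
    · constructor
      · simp [encA]; cases b <;> simp
      · have he : encA [b] = b.toNat := by simp [encA]; cases b <;> simp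
        simp [he, transF]
        cases b <;> simp [pvBitCount_zero]
    · obtain ⟨ih1, ih2⟩ := ih hne
      have hlen : 1 ≤ xs.length := by
        cases xs with | nil => exact absurd rfl hne | cons _ _ => simp
      set n := encA xs with hn
      have hsnoc : encA (xs ++ [b]) = 2*n + b.toNat := encA_snoc xs b
      constructor
      · rw [List.getLast_append_singleton, hsnoc]
        have hb : b.toNat = 0 ∨ b.toNat = 1 := by cases b <;> simp
        rcases hb with h | h <;> rw [h] <;> omega
      · -- divide: (2n + t)/2 = n
        have hdiv : encA (xs ++ [b]) / 2 = n := by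
          have hb : b.toNat = 0 ∨ b.toNat = 1 := by cases b <;> simp
          rw [hsnoc]; rcases hb with h | h <;> rw [h] <;> omega
        have hlastb : (xs.getLast hne).toNat ≤ 1 := by cases xs.getLast hne <;> simp
        have hxor : encA (xs ++ [b]) ^^^ encA (xs ++ [b]) / 2
            = 2*(n ^^^ n/2) + ((b != xs.getLast hne)).toNat := by
          rw [hdiv, hsnoc]
          have hsplit : n = 2*(n/2) + (xs.getLast hne).toNat := by
            rw [← ih1]; omega
          calc 2*n + b.toNat ^^^ n
              = (2*n + b.toNat) ^^^ (2*(n/2) + (xs.getLast hne).toNat) := by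
                rw [← hsplit]
            _ = 2*(n ^^^ n/2) + ((b != xs.getLast hne)).toNat := xor_step n (n/2) b (xs.getLast hne)
        have hlen' : (xs ++ [b]).length - 1 = xs.length := by simp
        have hpow : (2:Nat) ^ xs.length = 2 * 2 ^ (xs.length - 1) := by
          conv_lhs => rw [show xs.length = (xs.length - 1) + 1 from by omega]
          rw [pow_succ]; ring
        rw [hxor, hlen', hpow,
            mod_double _ _ _ (by cases (b != xs.getLast hne) <;> simp) (Nat.pow_pos (by omega)),
            pvBitCount_step _ _ (by cases (b != xs.getLast hne) <;> simp), ih2]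
        have hhead : (xs ++ [b]).head (by simp) = xs.head hne := by
          cases xs with | nil => exact absurd rfl hne | cons _ _ => simp
        have htail : (xs ++ [b]).tail = xs.tail ++ [b] := by
          cases xs with | nil => exact absurd rfl hne | cons _ _ => simp
        rw [hhead, htail, transF_snoc]
        have hlast : (xs.head hne :: xs.tail).getLast? = some (xs.getLast hne) := by
          have hcl : xs.head hne :: xs.tail = xs := by
            cases xs with | nil => exact absurd rfl hne | cons _ _ => rfl
          rw [hcl]; exact List.getLast?_eq_some_getLast hne
        rw [hlast]
        by_cases hbe : b = xs.getLast hne <;> simp [hbe]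

theorem alt_eq_trans (xs : List Bool) :
    has_flaky_behavior_py_alt xs
      = decide ((if h : xs = [] then 0 else transF (xs.head h) xs.tail) > 2) := by
  simp only [has_flaky_behavior_py_alt, enc_eq]
  have hmask : (1 <<< (max (xs.length - 1) 0)) - 1 = 2 ^ (xs.length - 1) - 1 := by
    rw [Nat.one_shiftLeft]; simp
  rw [hmask]
  have hshr : encA xs >>> 1 = encA xs / 2 := Nat.shiftRight_one _
  rw [hshr, Nat.and_two_pow_sub_one_eq_mod]
  rcases eq_or_ne xs [] with rfl | hne
  · simp [encA, pvBitCount_zero]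
  · rw [(key xs hne).2, dif_neg hne]

-- ===== VERDICT (by name: the statement is the Claim_ definition above) =====
theorem has_flaky_behavior_py_spec : Claim_equal_has_flaky_behavior_py := by
  unfold Claim_equal_has_flaky_behavior_py
  intro states _
  unfold Spec_has_flaky_behavior_py
  rw [alt_eq_trans]
  unfold has_flaky_behavior_py
  rcases states with _ | ⟨a, t⟩
  · simp
  · rcases t with _ | ⟨b, t⟩
    · simp [transF]
    · rw [if_neg (by simp)]
      simp only [acount]
      rw [dif_neg (by simp), dif_neg (by simp)]
      simp only [List.head_cons, List.tail_cons]
      by_cases h : transF a (b :: t) > 2 <;> simp [h]
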